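-- pv_equiv track=rewrite | github.com/kromrent/triade | services/intent_service.py | _best_control_word_match
-- ===== SOURCE A (Python) =====
-- def _best_control_word_match(token: str, candidates: tuple[str, ...]) -> str | None:
--     if token in candidates:
--         return token
--
--     best_match: str | None = None
--     best_length_delta: int | None = None
--     for candidate in candidates:
--         if not _is_single_typo_variant(token, candidate):
--             continue
--         length_delta = abs(len(candidate) - len(token))
--         if best_match is None or best_length_delta is None or length_delta < best_length_delta:
--             best_match = candidate
--             best_length_delta = length_delta
--     return best_match
--
-- def _is_single_typo_variant(left: str, right: str) -> bool:
--     if left == right: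
--         return True
--     if abs(len(left) - len(right)) > 1:
--         return False
--
--     if len(left) == len(right):
--         diffs = [index for index, pair in enumerate(zip(left, right)) if pair[0] != pair[1]]
--         if len(diffs) == 1:
--             return True
--         if len(diffs) == 2:
--             first, second = diffs
--             return (
--                 second == first + 1
--                 and left[first] == right[second]
--                 and left[second] == right[first]
--             )
--         return False
--
--     shorter, longer = (left, right) if len(left) < len(right) else (right, left)
--     short_index = 0
--     long_index = 0
--     skipped = False
--     while short_index < len(shorter) and long_index < len(longer):
--         if shorter[short_index] == longer[long_index]:
--             short_index += 1
--             long_index += 1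
--             continue
--         if skipped:
--             return False
--         skipped = True
--         long_index += 1
--     return True
-- ===== SOURCE B (Python) =====
-- def _common_prefix_len(left: str, right: str) -> int:
--     p = 0
--     while p < len(left) and p < len(right) and left[p] == right[p]:
--         p += 1
--     return p
--
--
-- def _common_suffix_len(left: str, right: str, cap: int) -> int:
--     s = 0
--     while s < len(left) and s < len(right) and s < cap and left[len(left) - 1 - s] == right[len(right) - 1 - s]:
--         s += 1
--     return s
--
--
-- def _is_single_typo_variant(left: str, right: str) -> bool:
--     if left == right:
--         return True
--     la, lb = len(left), len(right)
--     if abs(la - lb) > 1: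
--         return False
--     p = _common_prefix_len(left, right)
--     s = _common_suffix_len(left, right, max(la, lb) - p)
--     if la == lb:
--         return p + s == la - 1 or (
--             p + s == la - 2 and left[p] == right[p + 1] and left[p + 1] == right[p]
--         )
--     return p + s >= min(la, lb)
--
--
-- def _best_control_word_match(token: str, candidates: tuple[str, ...]) -> str | None:
--     if token in candidates:
--         return token
--     return min(
--         (c for c in candidates if _is_single_typo_variant(token, c)),
--         key=lambda c: abs(len(c) - len(token)),
--         default=None,
--     )
-- ===== Notes on version B (the rewrite author's own statement) =====
-- stated objective: simpler
-- what changed: The single-typo test is recomputed from the longest-common-prefix and capped longest-common-suffix lengths plus length arithmetic instead of A's diff-index list and two-pointer deletion-skip loop, and the best-match accumulator loop is replaced by min() with a length-delta key over the filtered candidates.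
import Mathlib
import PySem

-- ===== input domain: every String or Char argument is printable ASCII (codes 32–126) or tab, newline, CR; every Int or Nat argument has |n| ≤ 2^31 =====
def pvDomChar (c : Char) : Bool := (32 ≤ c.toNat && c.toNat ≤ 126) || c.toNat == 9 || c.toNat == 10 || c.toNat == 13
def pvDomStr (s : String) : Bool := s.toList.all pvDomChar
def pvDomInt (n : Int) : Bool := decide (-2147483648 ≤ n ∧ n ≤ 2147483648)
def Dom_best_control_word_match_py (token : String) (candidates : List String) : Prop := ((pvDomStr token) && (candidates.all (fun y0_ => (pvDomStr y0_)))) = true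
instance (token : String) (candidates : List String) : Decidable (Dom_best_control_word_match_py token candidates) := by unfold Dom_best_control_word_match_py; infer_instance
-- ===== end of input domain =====

-- B replaces A's diff-index list and two-pointer skip loop by common prefix/suffix length
-- arithmetic, and A's best-match accumulator loop by min() over the filtered candidates
-- (objective: simpler).


-- ===== PORT A =====

-- the `while short_index < … and long_index < …` deletion-skip loop of _is_single_typo_variant
def pvSkipLoop : List Char → List Char → Bool → Bool
  | s :: ss, t :: tt, skipped =>
      if s = t then pvSkipLoop ss tt skipped
      else if skipped then false
      else pvSkipLoop (s :: ss) tt true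
  | _, _, _ => true
  termination_by _ ll _ => ll.length

-- `[index for index, pair in enumerate(zip(left, right)) if pair[0] != pair[1]]`
def pvDiffs (l r : List Char) : List Int :=
  ((PySem.List.enumerate (l.zip r)).filter (fun q => decide (q.2.1 ≠ q.2.2))).map (·.1)

-- `_is_single_typo_variant(left, right)` on the strings' character lists
def pvTypoA (l r : List Char) : Bool :=
  if l = r then true
  else if 1 < ((l.length : Int) - (r.length : Int)).natAbs then false
  else if l.length = r.length then
    match pvDiffs l r with
    | [_] => true
    | [f, s] =>
        decide (s = f + 1)
          && (PySem.List.pyGet? l f == PySem.List.pyGet? r s)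
          && (PySem.List.pyGet? l s == PySem.List.pyGet? r f)
    | _ => false
  else
    let sl := if l.length < r.length then (l, r) else (r, l)
    pvSkipLoop sl.1 sl.2 false

def best_control_word_match_py (token : String) (candidates : List String) : Option String :=
  if token ∈ candidates then some token
  else
    (candidates.foldl
      (fun (st : Option String × Option Nat) candidate =>
        if !pvTypoA token.toList candidate.toList then st
        else
          let delta := ((candidate.toList.length : Int) - (token.toList.length : Int)).natAbs
          match st with
          | (some b, some d) => if delta < d then (some candidate, some delta) else (some b, some d)
          | _ => (some candidate, some delta))
      (none, none)).1

-- ===== PORT B =====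

-- `_common_prefix_len`: characters compared left to right while both strings last
def pvLcp : List Char → List Char → Nat
  | a :: as, b :: bs => if a = b then pvLcp as bs + 1 else 0
  | _, _ => 0

-- `_common_suffix_len`: characters compared from the right ends (reversed lists), at most `cap` of them
def pvSufScan : List Char → List Char → Nat → Nat
  | a :: as, b :: bs, c + 1 => if a = b then pvSufScan as bs c + 1 else 0
  | _, _, _ => 0

-- `_is_single_typo_variant` of Source B; Python's `p + s == la - 1` / `la - 2` comparisons are over ℤ,
-- so they are stated additively (`p + s + 1 = la`) to avoid ℕ truncation
def pvTypoB (l r : List Char) : Bool :=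
  if l = r then true
  else
    let la := l.length
    let lb := r.length
    if 1 < ((la : Int) - (lb : Int)).natAbs then false
    else
      let p := pvLcp l r
      let s := pvSufScan l.reverse r.reverse (max la lb - p)
      if la = lb then
        decide (p + s + 1 = la)
          || (decide (p + s + 2 = la)
              && (PySem.List.pyGet? l (p : Int) == PySem.List.pyGet? r ((p : Int) + 1))
              && (PySem.List.pyGet? l ((p : Int) + 1) == PySem.List.pyGet? r (p : Int)))
      else decide (min la lb ≤ p + s)

def best_control_word_match_py_alt (token : String) (candidates : List String) : Option String :=
  if token ∈ candidates then some token
  else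
    PySem.List.min? (candidates.filter (fun c => pvTypoB token.toList c.toList))
      (fun c => ((c.toList.length : Int) - (token.toList.length : Int)).natAbs)

-- ===== PRECONDITION & SPEC =====
def Spec_best_control_word_match_py (token : String) (candidates : List String) (out : Option String) : Prop := out = best_control_word_match_py_alt token candidates
instance (token : String) (candidates : List String) (out : Option String) : Decidable (Spec_best_control_word_match_py token candidates out) := by unfold Spec_best_control_word_match_py; infer_instance

-- ===== CLAIM (what is proved, stated in full; the proofs are below) =====
def Claim_equal_best_control_word_match_py : Prop := ∀ (token : String) (candidates : List String), Dom_best_control_word_match_py token candidates → Spec_best_control_word_match_py token candidates (best_control_word_match_py token candidates)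

-- ===== LEMMAS AND PROOFS =====



theorem pvLcp_le_left (l r : List Char) : pvLcp l r ≤ l.length := by
  induction l generalizing r with
  | nil => cases r <;> simp [pvLcp]
  | cons a as ih =>
    cases r with
    | nil => simp [pvLcp]
    | cons b bs =>
      simp only [pvLcp, List.length_cons]
      split
      · exact Nat.succ_le_succ (ih bs)
      · omega


theorem pvLcp_comm (l r : List Char) : pvLcp l r = pvLcp r l := by
  induction l generalizing r with
  | nil => cases r <;> simp [pvLcp]
  | cons a as ih =>
    cases r with
    | nil => simp [pvLcp]
    | cons b bs =>
      simp only [pvLcp]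
      by_cases hab : a = b
      · subst hab; simp [ih]
      · simp [hab, Ne.symm hab]

theorem pvSufScan_eq_min (x y : List Char) (c : Nat) : pvSufScan x y c = min (pvLcp x y) c := by
  induction x generalizing y c with
  | nil => cases y <;> cases c <;> simp [pvSufScan, pvLcp]
  | cons a as ih =>
    cases y with
    | nil => cases c <;> simp [pvSufScan, pvLcp]
    | cons b bs =>
      cases c with
      | zero => simp [pvSufScan]
      | succ c' =>
        simp only [pvSufScan, pvLcp]
        by_cases hab : a = b
        · simp only [hab, if_pos, ih]; omega
        · simp [hab]

theorem pvLcp_ge_iff (l r : List Char) (k : Nat) (hl : k ≤ l.length) (hr : k ≤ r.length) :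
    k ≤ pvLcp l r ↔ l.take k = r.take k := by
  induction l generalizing r k with
  | nil =>
    simp at hl
    subst hl
    simp
  | cons a as ih =>
    cases r with
    | nil => simp at hr; subst hr; simp
    | cons b bs =>
      cases k with
      | zero => simp
      | succ k' =>
        simp only [pvLcp, List.take_succ_cons]
        by_cases hab : a = b
        · subst hab
          rw [if_pos rfl]
          constructor
          · intro h
            have := (ih bs k' (by simpa using hl) (by simpa using hr)).1 (by omega)
            simp [this]
          · intro h
            have h' := (List.cons_inj_right a).1 h
            have := (ih bs k' (by simpa using hl) (by simpa using hr)).2 h'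
            omega
        · rw [if_neg hab]
          constructor
          · omega
          · intro h
            exact absurd (by injection h) hab

theorem pvLcp_lt_of_ne (l r : List Char) (hlen : l.length = r.length) (hne : l ≠ r) :
    pvLcp l r < l.length := by
  rcases Nat.lt_or_ge (pvLcp l r) l.length with h | h
  · exact h
  · exfalso
    have := (pvLcp_ge_iff l r l.length le_rfl (le_of_eq hlen)).1 h
    rw [List.take_length] at this
    apply hne
    rw [this, hlen, List.take_length]

theorem pvLcp_append_of_ne (x y : List Char) (a b : Char) (hlen : x.length = y.length)
    (hne : x ≠ y) : pvLcp (x ++ [a]) (y ++ [b]) = pvLcp x y := by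
  induction x generalizing y with
  | nil =>
    cases y with
    | nil => exact absurd rfl hne
    | cons => simp at hlen
  | cons c cs ih =>
    cases y with
    | nil => simp at hlen
    | cons d ds =>
      simp only [List.cons_append, pvLcp]
      by_cases hcd : c = d
      · subst hcd
        have : cs ≠ ds := fun h => hne (by rw [h])
        simp [ih ds (by simpa using hlen) this]
      · simp [hcd]

theorem pvRev_ge_iff_drop (l r : List Char) (hlen : l.length = r.length) (k : Nat) :
    l.length - k ≤ pvLcp l.reverse r.reverse ↔ l.drop k = r.drop k := by
  rw [pvLcp_ge_iff l.reverse r.reverse (l.length - k) (by simp) (by simp; omega)]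
  constructor
  · intro h
    have : (l.drop k).reverse = (r.drop k).reverse := by
      rw [List.reverse_drop, List.reverse_drop, ← hlen, h]
    exact List.reverse_injective this
  · intro h
    rw [← List.reverse_drop, hlen, ← List.reverse_drop, h]





theorem pvSkip_true (x y : List Char) (hlen : x.length = y.length) :
    pvSkipLoop x y true = decide (x = y) := by
  induction x generalizing y with
  | nil => cases y with
    | nil => simp [pvSkipLoop]
    | cons => simp at hlen
  | cons a as ih =>
    cases y with
    | nil => simp at hlen
    | cons b bs =>
      simp only [pvSkipLoop]
      by_cases hab : a = b
      · subst hab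
        rw [if_pos rfl, ih bs (by simpa using hlen)]
        simp
      · simp [hab]

theorem pvSkip_false (ss ll : List Char) (hlen : ll.length = ss.length + 1) :
    pvSkipLoop ss ll false =
      decide (ss.drop (pvLcp ss ll) = ll.drop (pvLcp ss ll + 1)) := by
  induction ss generalizing ll with
  | nil =>
    cases ll with
    | nil => simp at hlen
    | cons t tt =>
      cases tt with
      | nil => simp [pvSkipLoop, pvLcp]
      | cons => simp at hlen
  | cons s ss' ih =>
    cases ll with
    | nil => simp at hlen
    | cons t tt =>
      by_cases hst : s = t
      · subst hst
        simp only [pvSkipLoop, pvLcp, List.drop_succ_cons]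
        exact ih tt (by simpa using hlen)
      · simp only [pvSkipLoop, if_neg hst, pvLcp, Bool.false_eq_true, if_false]
        rw [pvSkip_true _ tt (by simpa using hlen.symm)]
        simp

theorem pvDrop_iff_suffix (ss ll : List Char) (hlen : ll.length = ss.length + 1) :
    (ss.drop (pvLcp ss ll) = ll.drop (pvLcp ss ll + 1)) ↔
      ss.length - pvLcp ss ll ≤ pvLcp ss.reverse ll.reverse := by
  rw [pvLcp_ge_iff ss.reverse ll.reverse (ss.length - pvLcp ss ll) (by simp) (by simp; omega)]
  rw [← List.reverse_drop]
  rw [show ss.length - pvLcp ss ll = ll.length - (pvLcp ss ll + 1) by omega]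
  rw [← List.reverse_drop]
  exact ⟨fun h => by rw [h], fun h => List.reverse_injective h⟩

theorem pvEnum_shift {α : Type} (xs : List α) (s : Int) :
    PySem.List.enumerate xs (s + 1) = (PySem.List.enumerate xs s).map (fun q => (q.1 + 1, q.2)) := by
  induction xs generalizing s with
  | nil => simp [PySem.List.enumerate]
  | cons x xs ih =>
    rw [PySem.List.enumerate_cons, PySem.List.enumerate_cons, ih]
    simp

theorem pvDiffs_cons (a b : Char) (l r : List Char) :
    pvDiffs (a :: l) (b :: r) =
      (if a = b then ([] : List Int) else [0]) ++ (pvDiffs l r).map (· + 1) := by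
  simp only [pvDiffs, List.zip_cons_cons, PySem.List.enumerate_cons]
  rw [show (0 : Int) + 1 = 0 + 1 from rfl, pvEnum_shift]
  rw [List.filter_cons, List.filter_map, List.map_map]
  by_cases hab : a = b
  · subst hab
    simp [Function.comp_def]
  · simp [hab, Function.comp_def]

theorem pvDiffs_nonneg (l r : List Char) : ∀ i ∈ pvDiffs l r, 0 ≤ i := by
  induction l generalizing r with
  | nil => intro i hi; simp [pvDiffs] at hi
  | cons a as ih =>
    cases r with
    | nil => intro i hi; simp [pvDiffs] at hi
    | cons b bs =>
      intro i hi
      rw [pvDiffs_cons] at hi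
      rcases List.mem_append.1 hi with h | h
      · split at h <;> simp at h
        omega
      · rcases List.mem_map.1 h with ⟨j, hj, rfl⟩
        have := ih bs j hj
        omega

theorem pvDiffs_nil_iff (l r : List Char) (hlen : l.length = r.length) :
    pvDiffs l r = [] ↔ l = r := by
  induction l generalizing r with
  | nil =>
    cases r with
    | nil => simp [pvDiffs]
    | cons => simp at hlen
  | cons a as ih =>
    cases r with
    | nil => simp at hlen
    | cons b bs =>
      rw [pvDiffs_cons]
      by_cases hab : a = b
      · subst hab
        simp [ih bs (by simpa using hlen)]
      · simp [hab]

theorem pvDiffs_eq_zero_iff (l r : List Char) (hlen : l.length = r.length) :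
    pvDiffs l r = [0] ↔ l ≠ r ∧ l.drop 1 = r.drop 1 := by
  cases l with
  | nil =>
    cases r with
    | nil => simp [pvDiffs]
    | cons => simp at hlen
  | cons a as =>
    cases r with
    | nil => simp at hlen
    | cons b bs =>
      rw [pvDiffs_cons]
      by_cases hab : a = b
      · subst hab
        simp only [List.drop_one, List.tail_cons]
        constructor
        · intro h
          rcases hmap : pvDiffs as bs with _ | ⟨j, js⟩
          · rw [hmap] at h; simp at h
          · rw [hmap] at h
            simp at h
            exfalso
            have hj := pvDiffs_nonneg as bs j (by rw [hmap]; simp)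
            omega
        · rintro ⟨hne, htail⟩
          exfalso
          exact hne (by rw [htail])
      · simp only [if_neg hab, List.cons_append, List.nil_append, List.drop_one, List.tail_cons]
        constructor
        · intro h
          have h2 : (pvDiffs as bs).map (· + 1) = [] := by
            injection h
          have : pvDiffs as bs = [] := by simpa using h2
          have := (pvDiffs_nil_iff as bs (by simpa using hlen)).1 this
          subst this
          exact ⟨by simp [hab], rfl⟩
        · rintro ⟨hne, htail⟩
          subst htail
          rw [(pvDiffs_nil_iff as as rfl).2 rfl]
          rfl

theorem pvGet_cons (a : Char) (l : List Char) (i : Int) (hi : 0 ≤ i) :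
    PySem.List.pyGet? (a :: l) (i + 1) = PySem.List.pyGet? l i := by
  obtain ⟨n, rfl⟩ : ∃ n : Nat, i = (n : Int) := ⟨i.toNat, (Int.toNat_of_nonneg hi).symm⟩
  rw [show ((n : Int) + 1) = ((n + 1 : Nat) : Int) by push_cast; ring]
  rw [PySem.List.pyGet?_natCast, PySem.List.pyGet?_natCast]
  simp



theorem pvTypoA_of_eqlen (l r : List Char) (hlen : l.length = r.length) (hne : l ≠ r) :
    pvTypoA l r =
      (match pvDiffs l r with
        | [_] => true
        | [f, s] =>
            decide (s = f + 1)
              && (PySem.List.pyGet? l f == PySem.List.pyGet? r s)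
              && (PySem.List.pyGet? l s == PySem.List.pyGet? r f)
        | _ => false) := by
  rw [pvTypoA, if_neg hne, if_neg (by rw [hlen]; simp), if_pos hlen]

theorem pvTypoB_of_eqlen (l r : List Char) (hlen : l.length = r.length) (hne : l ≠ r) :
    pvTypoB l r =
      (decide (pvLcp l r + min (pvLcp l.reverse r.reverse) (l.length - pvLcp l r) + 1 = l.length)
        || (decide (pvLcp l r + min (pvLcp l.reverse r.reverse) (l.length - pvLcp l r) + 2 = l.length)
            && (PySem.List.pyGet? l (pvLcp l r : Int) == PySem.List.pyGet? r ((pvLcp l r : Int) + 1))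
            && (PySem.List.pyGet? l ((pvLcp l r : Int) + 1) == PySem.List.pyGet? r (pvLcp l r : Int)))) := by
  rw [pvTypoB]
  rw [if_neg hne]
  simp only [hlen, sub_self, Int.natAbs_zero, max_self]
  rw [if_neg (by norm_num), pvSufScan_eq_min, ← hlen]
  simp

theorem pvTypo_eq_len (l r : List Char) (hlen : l.length = r.length) :
    pvTypoA l r = pvTypoB l r := by
  induction l generalizing r with
  | nil =>
    cases r with
    | nil => simp [pvTypoA, pvTypoB]
    | cons => simp at hlen
  | cons a as ih =>
    cases r with
    | nil => simp at hlen
    | cons b bs =>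
      by_cases heq : (a :: as : List Char) = b :: bs
      · rw [heq]; simp [pvTypoA, pvTypoB]
      · have hlen' : as.length = bs.length := by simpa using hlen
        rw [pvTypoA_of_eqlen _ _ hlen heq, pvTypoB_of_eqlen _ _ hlen heq]
        by_cases hab : a = b
        · -- heads equal: both sides reduce to the tail instance
          subst hab
          have hne' : as ≠ bs := fun h => heq (by rw [h])
          have htails := ih bs hlen'
          rw [pvTypoA_of_eqlen _ _ hlen' hne', pvTypoB_of_eqlen _ _ hlen' hne'] at htails
          have hBp : pvLcp (a :: as) (a :: bs) = pvLcp as bs + 1 := by simp [pvLcp]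
          have hBrev : pvLcp (a :: as).reverse (a :: bs).reverse = pvLcp as.reverse bs.reverse := by
            simp only [List.reverse_cons]
            exact pvLcp_append_of_ne _ _ _ _ (by simp [hlen'])
              (fun h => hne' (List.reverse_injective h))
          have hA : (match pvDiffs (a :: as) (a :: bs) with
              | [_] => true
              | [f, s] =>
                  decide (s = f + 1)
                    && (PySem.List.pyGet? (a :: as) f == PySem.List.pyGet? (a :: bs) s)
                    && (PySem.List.pyGet? (a :: as) s == PySem.List.pyGet? (a :: bs) f)
              | _ => false) =
              (match pvDiffs as bs with
              | [_] => true
              | [f, s] =>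
                  decide (s = f + 1)
                    && (PySem.List.pyGet? as f == PySem.List.pyGet? bs s)
                    && (PySem.List.pyGet? as s == PySem.List.pyGet? bs f)
              | _ => false) := by
            rw [pvDiffs_cons, if_pos rfl, List.nil_append]
            rcases hd : pvDiffs as bs with _ | ⟨f, _ | ⟨s2, _ | ⟨x, xs⟩⟩⟩
            · simp
            · simp
            · have hf : 0 ≤ f := pvDiffs_nonneg as bs f (by rw [hd]; exact List.mem_cons_self)
              have hs2 : 0 ≤ s2 := pvDiffs_nonneg as bs s2
                (by rw [hd]; exact List.mem_cons_of_mem _ List.mem_cons_self)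
              simp only [List.map_cons, List.map_nil]
              rw [pvGet_cons a as f hf, pvGet_cons a bs s2 hs2,
                pvGet_cons a as s2 hs2, pvGet_cons a bs f hf]
              have : (s2 + 1 = f + 1 + 1) ↔ (s2 = f + 1) := by omega
              simp only [this]
            · simp
          rw [hA, hBp, hBrev]
          have e1 : (pvLcp as bs + 1 +
                min (pvLcp as.reverse bs.reverse) ((a :: as).length - (pvLcp as bs + 1)) + 1 =
              (a :: as).length) ↔
              (pvLcp as bs + min (pvLcp as.reverse bs.reverse) (as.length - pvLcp as bs) + 1 =
                as.length) := by
            simp only [List.length_cons, Nat.succ_sub_succ]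
            omega
          have e2 : (pvLcp as bs + 1 +
                min (pvLcp as.reverse bs.reverse) ((a :: as).length - (pvLcp as bs + 1)) + 2 =
              (a :: as).length) ↔
              (pvLcp as bs + min (pvLcp as.reverse bs.reverse) (as.length - pvLcp as bs) + 2 =
                as.length) := by
            simp only [List.length_cons, Nat.succ_sub_succ]
            omega
          simp only [e1, e2]
          have hcast : ((pvLcp as bs + 1 : Nat) : Int) = (pvLcp as bs : Int) + 1 := by push_cast; ring
          rw [hcast, pvGet_cons a as _ (Int.natCast_nonneg _), pvGet_cons a bs _ (Int.natCast_nonneg _),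
            pvGet_cons a as _ (by positivity), pvGet_cons a bs _ (by positivity)]
          exact htails
        · -- heads differ
          have hp : pvLcp (a :: as) (b :: bs) = 0 := by simp [pvLcp, hab]
          have hrevne : (a :: as).reverse ≠ (b :: bs).reverse :=
            fun h => heq (List.reverse_injective h)
          have hvl : pvLcp (a :: as).reverse (b :: bs).reverse < as.length + 1 := by
            have := pvLcp_lt_of_ne (a :: as).reverse (b :: bs).reverse (by simp [hlen']) hrevne
            simpa using this
          have h1 := pvRev_ge_iff_drop (a :: as) (b :: bs) hlen 1
          simp only [List.length_cons, Nat.succ_sub_one, List.drop_one, List.tail_cons] at h1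
          have h2 := pvRev_ge_iff_drop (a :: as) (b :: bs) hlen 2
          simp only [List.length_cons, List.drop_succ_cons, Nat.succ_sub_succ] at h2
          set v := pvLcp (a :: as).reverse (b :: bs).reverse with hv
          rw [hp, pvDiffs_cons, if_neg hab, List.cons_append, List.nil_append]
          simp only [Nat.sub_zero, Nat.cast_zero, zero_add]
          have hminv : min v ((a :: as).length) = v := by
            simp only [List.length_cons]; omega
          rw [hminv]
          rcases hd : pvDiffs as bs with _ | ⟨j, _ | ⟨j2, rest⟩⟩
          · -- tails equal: single substitution at position 0
            have hasbs := (pvDiffs_nil_iff as bs hlen').1 hd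
            have hv1 : v + 1 = (a :: as).length := by
              have := h1.2 hasbs
              simp only [List.length_cons]
              omega
            simp [hv1]
          · -- one diff in the tails
            have hasbs : as ≠ bs := by
              intro h
              rw [(pvDiffs_nil_iff as bs hlen').2 h] at hd
              simp at hd
            have hnv1 : ¬(v + 1 = (a :: as).length) := by
              intro h
              exact hasbs (h1.1 (by simp only [List.length_cons] at h ⊢; omega))
            have hj0 : 0 ≤ j := pvDiffs_nonneg as bs j (by rw [hd]; exact List.mem_cons_self)
            by_cases hj : j = (0 : Int)
            · subst hj
              have hzero := (pvDiffs_eq_zero_iff as bs hlen').1 hd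
              have haslen : 1 ≤ as.length := by
                rcases as with _ | _
                · rcases bs with _ | _
                  · exact absurd rfl hasbs
                  · simp at hlen'
                · simp
              have hv2 : v + 2 = (a :: as).length := by
                have hge := h2.2 hzero.2
                have hub : ¬ as.length ≤ v := fun hh => hzero.1 (h1.1 hh)
                simp only [List.length_cons]
                omega
              have hfalse1 : v ≠ as.length := by
                simp only [List.length_cons] at hnv1
                omega
              simp [hv2, hfalse1]
            · have hnv2 : ¬(v + 2 = (a :: as).length) := by
                intro h
                have : as.length - 1 ≤ v := by simp only [List.length_cons] at h; omega
                have := (pvDiffs_eq_zero_iff as bs hlen').2 ⟨hasbs, h2.1 this⟩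
                rw [hd] at this
                simp at this
                exact hj this
              have hA1 : ¬v = as.length := by
                simp only [List.length_cons] at hnv1
                omega
              have hA2 : ¬v + 1 = as.length := by
                simp only [List.length_cons] at hnv2
                omega
              simp [hj, hA1, hA2]
          · -- at least two diffs in the tails
            have hasbs : as ≠ bs := by
              intro h
              rw [(pvDiffs_nil_iff as bs hlen').2 h] at hd
              simp at hd
            have hnv1 : ¬(v + 1 = (a :: as).length) := by
              intro h
              exact hasbs (h1.1 (by simp only [List.length_cons] at h ⊢; omega))
            have hnv2 : ¬(v + 2 = (a :: as).length) := by
              intro h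
              have : as.length - 1 ≤ v := by simp only [List.length_cons] at h; omega
              have := (pvDiffs_eq_zero_iff as bs hlen').2 ⟨hasbs, h2.1 this⟩
              rw [hd] at this
              simp at this
            have hA1 : ¬v = as.length := by
              simp only [List.length_cons] at hnv1
              omega
            have hA2 : ¬v + 1 = as.length := by
              simp only [List.length_cons] at hnv2
              omega
            simp [hA1, hA2]

theorem pvTypoB_of_nelen (l r : List Char) (heq : l ≠ r)
    (habs : ¬1 < ((l.length : Int) - (r.length : Int)).natAbs) (hlen : l.length ≠ r.length) :
    pvTypoB l r =
      decide (min l.length r.length ≤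
        pvLcp l r + min (pvLcp l.reverse r.reverse) (max l.length r.length - pvLcp l r)) := by
  rw [pvTypoB, if_neg heq, if_neg habs, if_neg hlen, pvSufScan_eq_min]

theorem pvTypo_uneq (ss ll : List Char) (h : ll.length = ss.length + 1) :
    pvSkipLoop ss ll false =
      decide (min ss.length ll.length ≤
        pvLcp ss ll + min (pvLcp ss.reverse ll.reverse) (max ss.length ll.length - pvLcp ss ll)) := by
  rw [pvSkip_false ss ll h]
  have hp := pvLcp_le_left ss ll
  have hiff := pvDrop_iff_suffix ss ll h
  have hmain : (ss.drop (pvLcp ss ll) = ll.drop (pvLcp ss ll + 1)) ↔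
      (min ss.length ll.length ≤
        pvLcp ss ll + min (pvLcp ss.reverse ll.reverse) (max ss.length ll.length - pvLcp ss ll)) := by
    rw [hiff]
    constructor <;> intro <;> omega
  simp only [hmain]

theorem pvTypo_eq (l r : List Char) : pvTypoA l r = pvTypoB l r := by
  by_cases heq : l = r
  · simp [pvTypoA, pvTypoB, heq]
  · by_cases hlen : l.length = r.length
    · exact pvTypo_eq_len l r hlen
    · by_cases habs : 1 < ((l.length : Int) - (r.length : Int)).natAbs
      · rw [pvTypoA, if_neg heq, if_pos habs, pvTypoB, if_neg heq, if_pos habs]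
      · rw [pvTypoA, if_neg heq, if_neg habs, if_neg hlen,
          pvTypoB_of_nelen l r heq habs hlen]
        have hd1 : l.length + 1 = r.length ∨ r.length + 1 = l.length := by omega
        rcases hd1 with hcase | hcase
        · -- l is shorter
          have hlt : l.length < r.length := by omega
          simp only [if_pos hlt]
          exact pvTypo_uneq l r hcase.symm
        · -- r is shorter
          have hlt : ¬l.length < r.length := by omega
          simp only [if_neg hlt]
          rw [pvTypo_uneq r l hcase.symm, pvLcp_comm r l, pvLcp_comm r.reverse l.reverse,
            Nat.min_comm r.length, Nat.max_comm r.length]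

theorem pvFold_min (q : String → Bool) (k : String → Nat) (cs : List String)
    (st : Option String × Option Nat)
    (hinv : st = (none, none) ∨ ∃ b, st = (some b, some (k b))) :
    (cs.foldl
      (fun (st : Option String × Option Nat) candidate =>
        if !q candidate then st
        else
          let delta := k candidate
          match st with
          | (some b, some d) => if delta < d then (some candidate, some delta) else (some b, some d)
          | _ => (some candidate, some delta))
      st).1 =
    (cs.filter q).foldl
      (fun acc x =>
        match acc with
        | none => some x
        | some m => if k x < k m then some x else some m)
      st.1 := by
  induction cs generalizing st with
  | nil => simp
  | cons c cs ih =>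
    rw [List.foldl_cons, List.filter_cons]
    by_cases hq : q c
    · simp only [hq, Bool.not_true, Bool.false_eq_true, if_false, if_pos, List.foldl_cons]
      rcases hinv with h | ⟨b, h⟩
      · subst h
        exact ih (some c, some (k c)) (Or.inr ⟨c, rfl⟩)
      · subst h
        by_cases hlt : k c < k b
        · simp only [if_pos hlt]
          exact ih (some c, some (k c)) (Or.inr ⟨c, rfl⟩)
        · simp only [if_neg hlt]
          exact ih (some b, some (k b)) (Or.inr ⟨b, rfl⟩)
    · simp only [hq, Bool.not_false, if_true, Bool.false_eq_true, if_false]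
      exact ih st hinv

theorem pv_main (token : String) (candidates : List String) :
    best_control_word_match_py token candidates = best_control_word_match_py_alt token candidates := by
  unfold best_control_word_match_py best_control_word_match_py_alt
  by_cases hmem : token ∈ candidates
  · rw [if_pos hmem, if_pos hmem]
  · rw [if_neg hmem, if_neg hmem]
    have h := pvFold_min (fun c => pvTypoA token.toList c.toList)
      (fun c => ((c.toList.length : Int) - (token.toList.length : Int)).natAbs)
      candidates (none, none) (Or.inl rfl)
    have hfil : candidates.filter (fun c => pvTypoA token.toList c.toList) =
        candidates.filter (fun c => pvTypoB token.toList c.toList) :=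
      List.filter_congr (fun c _ => by rw [pvTypo_eq])
    refine h.trans ?_
    rw [hfil]
    unfold PySem.List.min?
    rw [show ((none, none) : Option String × Option Nat).1 = none from rfl]
    congr 1
    funext acc x
    cases acc <;> rfl

-- ===== VERDICT (by name: the statement is the Claim_ definition above) =====
theorem best_control_word_match_py_spec : Claim_equal_best_control_word_match_py := by
  intro token candidates _
  unfold Spec_best_control_word_match_py
  exact pv_main token candidates
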